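-- pv_equiv track=rewrite | github.com/abdulmajid100/multi-agv-coordination | try201.py | state_to_index
-- ===== SOURCE A (Python) =====
-- def state_to_index(state, grid_size):
--     num_agents = len(state)
--     flat_state = [coord for agent in state for coord in agent]
--     index = 0
--     factor = (grid_size[0] * grid_size[1]) ** (num_agents - 1)
--
--     for i in range(num_agents):
--         x, y = flat_state[2 * i], flat_state[2 * i + 1]
--         index += (x * grid_size[1] + y) * factor
--         factor //= (grid_size[0] * grid_size[1])
--
--     return index
-- ===== SOURCE B (Python) =====
-- def state_to_index(state, grid_size):
--     base = grid_size[0] * grid_size[1]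
--     index = 0
--     for x, y in state:
--         index = index * base + (x * grid_size[1] + y)
--     return index
-- ===== Notes on version B (the rewrite author's own statement) =====
-- stated objective: simpler
-- what changed: Replaces the descending precomputed factor (base ** (n-1) with a floordiv per step over an index-addressed flattened list) by a single ascending Horner pass that directly folds (index*base + x*grid_size[1] + y) over the agent pairs, with no exponentiation, no flattening and no division.
import Mathlib
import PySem

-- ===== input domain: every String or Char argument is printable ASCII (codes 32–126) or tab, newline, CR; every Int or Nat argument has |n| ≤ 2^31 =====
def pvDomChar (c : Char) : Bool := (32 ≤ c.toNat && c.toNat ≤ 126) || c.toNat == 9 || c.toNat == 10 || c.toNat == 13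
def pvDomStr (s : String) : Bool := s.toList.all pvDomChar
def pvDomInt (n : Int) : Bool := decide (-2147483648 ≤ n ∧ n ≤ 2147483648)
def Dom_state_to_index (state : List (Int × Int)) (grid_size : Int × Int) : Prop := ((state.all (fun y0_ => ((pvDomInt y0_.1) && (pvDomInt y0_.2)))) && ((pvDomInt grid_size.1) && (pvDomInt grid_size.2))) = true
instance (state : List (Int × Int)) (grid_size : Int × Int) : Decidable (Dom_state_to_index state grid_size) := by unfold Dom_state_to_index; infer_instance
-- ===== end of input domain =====

-- B replaces A's descending precomputed factor (power, flattened-list indexing, a floor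
-- division per step) by a single ascending Horner fold over the agent pairs: simpler.

-- ===== PORT A =====
def state_to_index (state : List (Int × Int)) (grid_size : Int × Int) : Int :=
  let num_agents : Nat := state.length
  let flat_state : List Int := state.flatMap (fun agent => [agent.1, agent.2])
  let r : Int × Int :=
    (PySem.List.pyRange 0 (num_agents : Int) 1).foldl
      (fun (acc : Int × Int) i =>
        let x := PySem.List.pyGetD flat_state (2 * i) 0
        let y := PySem.List.pyGetD flat_state (2 * i + 1) 0
        (acc.1 + (x * grid_size.2 + y) * acc.2,
         PySem.Int.floordiv acc.2 (grid_size.1 * grid_size.2)))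
      (0, (grid_size.1 * grid_size.2) ^ (num_agents - 1))
  r.1

-- ===== PORT B =====
def state_to_index_alt (state : List (Int × Int)) (grid_size : Int × Int) : Int :=
  let base : Int := grid_size.1 * grid_size.2
  state.foldl (fun index p => index * base + (p.1 * grid_size.2 + p.2)) 0

-- ===== PRECONDITION & SPEC =====
-- Pre_ excludes exactly the inputs where grid_size[0]*grid_size[1] == 0, on which the
-- Python A raises ZeroDivisionError (from '** (n-1)' on the empty state, from
-- 'factor //= base' otherwise).
def Pre_state_to_index (state : List (Int × Int)) (grid_size : Int × Int) : Prop :=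
  grid_size.1 * grid_size.2 ≠ 0
instance (state : List (Int × Int)) (grid_size : Int × Int) : Decidable (Pre_state_to_index state grid_size) := by unfold Pre_state_to_index; infer_instance

def pvWitness_state_to_index : (List (Int × Int)) × (Int × Int) := ([(1, 2), (0, 1)], (2, 3))

def Spec_state_to_index (state : List (Int × Int)) (grid_size : Int × Int) (out : Int) : Prop := out = state_to_index_alt state grid_size
instance (state : List (Int × Int)) (grid_size : Int × Int) (out : Int) : Decidable (Spec_state_to_index state grid_size out) := by unfold Spec_state_to_index; infer_instance

-- ===== CLAIM (what is proved, stated in full; the proofs are below) =====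
def Claim_equal_state_to_index : Prop := ∀ (state : List (Int × Int)) (grid_size : Int × Int), Dom_state_to_index state grid_size → Pre_state_to_index state grid_size → Spec_state_to_index state grid_size (state_to_index state grid_size)

-- ===== LEMMAS AND PROOFS =====

-- the flattened list of a list of pairs has twice its length
theorem pv_flat_length (l : List (Int × Int)) :
    (l.flatMap (fun agent => [agent.1, agent.2])).length = 2 * l.length := by
  induction l with
  | nil => simp
  | cons p t ih => simp [List.flatMap_cons, ih]; omega

-- pyGetD on an append, index inside the left part
theorem pv_pyGetD_append_left (xs ys : List Int) (i : Int) (d : Int)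
    (h0 : 0 ≤ i) (h : i < (xs.length : Int)) :
    PySem.List.pyGetD (xs ++ ys) i d = PySem.List.pyGetD xs i d := by
  rw [PySem.List.pyGetD_eq_getElem (xs ++ ys) d h0 (by simp; omega),
      PySem.List.pyGetD_eq_getElem xs d h0 h]
  exact List.getElem_append_left (by omega)

-- pyGetD on an append, index hitting the appended pair
theorem pv_pyGetD_append_pair (xs : List Int) (a b : Int) (d : Int) (k : Int)
    (hk : k = (xs.length : Int)) :
    PySem.List.pyGetD (xs ++ [a, b]) k d = a ∧
    PySem.List.pyGetD (xs ++ [a, b]) (k + 1) d = b := by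
  subst hk
  constructor
  · rw [PySem.List.pyGetD_eq_getElem _ d (by omega) (by simp)]
    simp
  · rw [PySem.List.pyGetD_eq_getElem _ d (by omega) (by simp)]
    have h1 : ((xs.length : Int) + 1).toNat = xs.length + 1 := by omega
    simp [h1, List.getElem_append_right (Nat.le_succ _)]

-- A's indexed loop over range(n) is a structural fold over the agent list
theorem pv_range_fold_eq_list_fold (g1 g2 : Int) :
    ∀ (l : List (Int × Int)) (acc : Int × Int),
    (PySem.List.pyRange 0 (l.length : Int) 1).foldl
      (fun (acc : Int × Int) i =>
        (acc.1 + ((PySem.List.pyGetD (l.flatMap (fun agent => [agent.1, agent.2])) (2 * i) 0) * g2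
                   + PySem.List.pyGetD (l.flatMap (fun agent => [agent.1, agent.2])) (2 * i + 1) 0) * acc.2,
         PySem.Int.floordiv acc.2 (g1 * g2))) acc
    = l.foldl
      (fun (acc : Int × Int) p =>
        (acc.1 + (p.1 * g2 + p.2) * acc.2, PySem.Int.floordiv acc.2 (g1 * g2))) acc := by
  intro l
  induction l using List.reverseRecOn with
  | nil => intro acc; simp [PySem.List.pyRange_one_eq_nil]
  | append_singleton t p ih =>
    intro acc
    have hflat : ((t ++ [p]).flatMap (fun agent => [agent.1, agent.2]))
        = t.flatMap (fun agent => [agent.1, agent.2]) ++ [p.1, p.2] := by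
      simp [List.flatMap_append]
    have hlen : ((t ++ [p]).length : Int) = (t.length : Int) + 1 := by simp
    have hrange : PySem.List.pyRange 0 ((t ++ [p]).length : Int) 1
        = PySem.List.pyRange 0 (t.length : Int) 1 ++ [(t.length : Int)] := by
      rw [hlen, PySem.List.pyRange_one_succ_right (by omega)]
    rw [hrange, hflat, List.foldl_append, List.foldl_append]
    have hsl : ((t.flatMap (fun agent => [agent.1, agent.2])).length : Int) = 2 * (t.length : Int) := by
      rw [pv_flat_length]; push_cast; ring
    have hinner :
        (PySem.List.pyRange 0 (t.length : Int) 1).foldl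
          (fun (acc : Int × Int) i =>
            (acc.1 + ((PySem.List.pyGetD (t.flatMap (fun agent => [agent.1, agent.2]) ++ [p.1, p.2]) (2 * i) 0) * g2
                       + PySem.List.pyGetD (t.flatMap (fun agent => [agent.1, agent.2]) ++ [p.1, p.2]) (2 * i + 1) 0) * acc.2,
             PySem.Int.floordiv acc.2 (g1 * g2))) acc
        = (PySem.List.pyRange 0 (t.length : Int) 1).foldl
          (fun (acc : Int × Int) i =>
            (acc.1 + ((PySem.List.pyGetD (t.flatMap (fun agent => [agent.1, agent.2])) (2 * i) 0) * g2
                       + PySem.List.pyGetD (t.flatMap (fun agent => [agent.1, agent.2])) (2 * i + 1) 0) * acc.2,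
             PySem.Int.floordiv acc.2 (g1 * g2))) acc := by
      apply PySem.List.foldl_congr_mem
      intro a i hi
      have hib := PySem.List.mem_pyRange_one.mp hi
      rw [pv_pyGetD_append_left _ _ _ _ (by omega) (by omega),
          pv_pyGetD_append_left _ _ _ _ (by omega) (by omega)]
    rw [hinner, ih acc]
    have hpair := pv_pyGetD_append_pair (t.flatMap (fun agent => [agent.1, agent.2])) p.1 p.2 0
        (2 * (t.length : Int)) (by omega)
    simp only [List.foldl_cons, List.foldl_nil]
    rw [hpair.1, hpair.2]

-- B's fold from a general accumulator
theorem pv_alt_fold_acc (base g2 : Int) :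
    ∀ (l : List (Int × Int)) (acc : Int),
    l.foldl (fun index p => index * base + (p.1 * g2 + p.2)) acc
      = acc * base ^ l.length + l.foldl (fun index p => index * base + (p.1 * g2 + p.2)) 0 := by
  intro l
  induction l with
  | nil => intro acc; simp
  | cons p t ih =>
    intro acc
    simp only [List.foldl_cons]
    rw [ih (acc * base + (p.1 * g2 + p.2)), ih (0 * base + (p.1 * g2 + p.2))]
    simp [pow_succ]
    ring

-- exact division of a power by its base
theorem pv_floordiv_pow (base : Int) (hb : base ≠ 0) (k : Nat) :
    PySem.Int.floordiv (base ^ (k + 1)) base = base ^ k := by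
  have h : base ^ (k + 1) = base * base ^ k := by ring
  simp [PySem.Int.floordiv, h, Int.mul_fdiv_cancel_left _ hb]

-- A's fold (with the descending factor) computes idx + Horner value
theorem pv_A_fold_eq (g1 g2 : Int) (hb : g1 * g2 ≠ 0) :
    ∀ (l : List (Int × Int)) (idx : Int),
    (l.foldl
      (fun (acc : Int × Int) p =>
        (acc.1 + (p.1 * g2 + p.2) * acc.2, PySem.Int.floordiv acc.2 (g1 * g2)))
      (idx, (g1 * g2) ^ (l.length - 1))).1
    = idx + l.foldl (fun index p => index * (g1 * g2) + (p.1 * g2 + p.2)) 0 := by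
  intro l
  induction l with
  | nil => intro idx; simp
  | cons p t ih =>
    intro idx
    simp only [List.foldl_cons, List.length_cons, Nat.add_sub_cancel]
    cases t with
    | nil => simp
    | cons q u =>
      have h2 : PySem.Int.floordiv ((g1 * g2) ^ ((q :: u).length)) (g1 * g2)
          = (g1 * g2) ^ ((q :: u).length - 1) := by
        have hl : (q :: u).length = u.length + 1 := rfl
        rw [hl]
        simpa using pv_floordiv_pow (g1 * g2) hb u.length
      rw [h2, ih (idx + (p.1 * g2 + p.2) * (g1 * g2) ^ (q :: u).length)]
      rw [pv_alt_fold_acc (g1 * g2) g2 (q :: u) (0 * (g1 * g2) + (p.1 * g2 + p.2))]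
      ring

-- ===== VERDICT (by name: the statement is the Claim_ definition above) =====
theorem state_to_index_spec : Claim_equal_state_to_index := by
  intro state grid_size _ hpre
  unfold Spec_state_to_index state_to_index state_to_index_alt
  simp only []
  rw [pv_range_fold_eq_list_fold grid_size.1 grid_size.2 state, pv_A_fold_eq grid_size.1 grid_size.2 hpre]
  simp
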